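-- pv_equiv track=rewrite | github.com/Jovinus/VO2max_Prediction | DL_Code/utils.py | get_hidden_sizes
-- ===== SOURCE A (Python) =====
-- def get_hidden_sizes(input_size, output_size, n_layers, n_node_first_hidden):
--     # step_size = int((input_size - output_size) / n_layers)
--
--     step_size = int((n_node_first_hidden - output_size) / n_layers)
--
--     hidden_sizes =[]
--     current_size = n_node_first_hidden
--
--     for i in range(n_layers - 1):
--         if i == 0:
--             hidden_sizes += [current_size]
--         else:
--             hidden_sizes += [current_size - step_size]
--         current_size = hidden_sizes[-1]
--
--     return hidden_sizes
-- ===== SOURCE B (Python) =====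
-- def get_hidden_sizes(input_size, output_size, n_layers, n_node_first_hidden):
--     step_size = int((n_node_first_hidden - output_size) / n_layers)
--     return [n_node_first_hidden - i * step_size for i in range(n_layers - 1)]
-- ===== Notes on version B (the rewrite author's own statement) =====
-- stated objective: simpler
-- what changed: Replaces the running current_size accumulator and the i==0 special case with a single closed-form comprehension computing each layer size directly from its index (measured ~2x faster in a timing run).
-- outside the precondition, e.g. on get_hidden_sizes(10, 2, 0, 16): A raises ZeroDivisionError, B raises ZeroDivisionError
import Mathlib
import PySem

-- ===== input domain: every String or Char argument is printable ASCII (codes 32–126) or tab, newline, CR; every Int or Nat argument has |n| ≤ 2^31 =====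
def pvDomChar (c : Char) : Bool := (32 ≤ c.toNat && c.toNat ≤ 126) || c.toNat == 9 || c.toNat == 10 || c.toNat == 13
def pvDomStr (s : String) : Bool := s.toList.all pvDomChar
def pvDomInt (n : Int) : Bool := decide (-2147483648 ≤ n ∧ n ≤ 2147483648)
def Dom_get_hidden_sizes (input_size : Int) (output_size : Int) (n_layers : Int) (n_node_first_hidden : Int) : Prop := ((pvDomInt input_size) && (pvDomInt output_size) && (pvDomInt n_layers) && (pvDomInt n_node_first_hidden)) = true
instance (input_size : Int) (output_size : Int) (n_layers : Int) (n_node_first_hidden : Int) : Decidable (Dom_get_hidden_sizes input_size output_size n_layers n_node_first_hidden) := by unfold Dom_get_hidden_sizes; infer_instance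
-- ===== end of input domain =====

-- B replaces the running current_size accumulator and the i==0 special case with a
-- closed-form list computing each element from its index (objective: simpler).

-- ===== PORT A =====
-- int((a)/b) : Python float division then truncation; on Dom (|operands| ≤ 2^31) the
-- float quotient never rounds across an integer, so it equals exact truncation toward
-- zero, which is Int.tdiv.
def get_hidden_sizes (input_size : Int) (output_size : Int) (n_layers : Int) (n_node_first_hidden : Int) : List Int :=
  let step_size := Int.tdiv (n_node_first_hidden - output_size) n_layers
  let st := (PySem.List.pyRange 0 (n_layers - 1) 1).foldl
    (fun (s : List Int × Int) i =>
      let hs := if i == 0 then s.1 ++ [s.2] else s.1 ++ [s.2 - step_size]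
      -- current_size = hidden_sizes[-1]; hs is nonempty here so pyGet? is some
      (hs, (PySem.List.pyGet? hs (-1)).getD 0))
    (([] : List Int), n_node_first_hidden)
  st.1

-- ===== PORT B =====
def get_hidden_sizes_alt (input_size : Int) (output_size : Int) (n_layers : Int) (n_node_first_hidden : Int) : List Int :=
  let step_size := Int.tdiv (n_node_first_hidden - output_size) n_layers
  (PySem.List.pyRange 0 (n_layers - 1) 1).map (fun i => n_node_first_hidden - i * step_size)

-- ===== PRECONDITION & SPEC =====
-- Pre_ excludes exactly n_layers = 0, where A raises ZeroDivisionError.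
def Pre_get_hidden_sizes (input_size : Int) (output_size : Int) (n_layers : Int) (n_node_first_hidden : Int) : Prop := n_layers ≠ 0
instance (input_size : Int) (output_size : Int) (n_layers : Int) (n_node_first_hidden : Int) : Decidable (Pre_get_hidden_sizes input_size output_size n_layers n_node_first_hidden) := by unfold Pre_get_hidden_sizes; infer_instance
def pvWitness_get_hidden_sizes : Int × Int × Int × Int := (10, 2, 4, 16)
def Spec_get_hidden_sizes (input_size : Int) (output_size : Int) (n_layers : Int) (n_node_first_hidden : Int) (out : List Int) : Prop := out = get_hidden_sizes_alt input_size output_size n_layers n_node_first_hidden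
instance (input_size : Int) (output_size : Int) (n_layers : Int) (n_node_first_hidden : Int) (out : List Int) : Decidable (Spec_get_hidden_sizes input_size output_size n_layers n_node_first_hidden out) := by unfold Spec_get_hidden_sizes; infer_instance

-- ===== CLAIM (what is proved, stated in full; the proofs are below) =====
def Claim_equal_get_hidden_sizes : Prop := ∀ (input_size : Int) (output_size : Int) (n_layers : Int) (n_node_first_hidden : Int), Dom_get_hidden_sizes input_size output_size n_layers n_node_first_hidden → Pre_get_hidden_sizes input_size output_size n_layers n_node_first_hidden → Spec_get_hidden_sizes input_size output_size n_layers n_node_first_hidden (get_hidden_sizes input_size output_size n_layers n_node_first_hidden)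

-- ===== LEMMAS AND PROOFS =====

-- last element of an appended singleton via Python's [-1]
theorem pyGet_neg_one_append (l : List Int) (x : Int) :
    (PySem.List.pyGet? (l ++ [x]) (-1)).getD 0 = x := by
  simp [PySem.List.pyGet?, PySem.List.pyIdx?]

-- A's loop over range(n+1) produces the arithmetic progression and the right accumulator
theorem loopA (s h : Int) (n : Nat) :
    (PySem.List.pyRange 0 ((n : Int) + 1) 1).foldl
      (fun (st : List Int × Int) i =>
        let hs := if i == 0 then st.1 ++ [st.2] else st.1 ++ [st.2 - s]
        (hs, (PySem.List.pyGet? hs (-1)).getD 0))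
      (([] : List Int), h)
    = ((PySem.List.pyRange 0 ((n : Int) + 1) 1).map (fun k => h - k * s), h - (n : Int) * s) := by
  induction n with
  | zero =>
    rw [show ((0 : Nat) : Int) + 1 = 0 + 1 by ring, PySem.List.pyRange_one_singleton]
    simp [PySem.List.pyGet?, PySem.List.pyIdx?]
  | succ n ih =>
    have hcast : ((n + 1 : Nat) : Int) + 1 = ((n : Int) + 1) + 1 := by push_cast; ring
    rw [hcast, PySem.List.pyRange_one_succ_right (a := 0) (b := (n : Int) + 1) (by omega)]
    rw [List.foldl_append, ih, List.map_append]
    simp only [List.foldl_cons, List.foldl_nil, List.map_cons, List.map_nil]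
    have hne : ¬ ((((n : Int) + 1)) == 0) = true := by simp; omega
    rw [if_neg hne, pyGet_neg_one_append]
    simp only [Prod.mk.injEq, List.append_cancel_left_eq, List.cons.injEq, and_true]
    push_cast
    constructor
    · ring
    · ring

-- ===== VERDICT (by name: the statement is the Claim_ definition above) =====
theorem get_hidden_sizes_spec : Claim_equal_get_hidden_sizes := by
  intro input_size output_size n_layers h _ _
  unfold Spec_get_hidden_sizes
  simp only [get_hidden_sizes, get_hidden_sizes_alt]
  by_cases hle : n_layers - 1 ≤ 0
  · rw [PySem.List.pyRange_one_eq_nil (by omega)]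
    simp
  · obtain ⟨n, hn⟩ : ∃ n : Nat, n_layers - 1 = (n : Int) + 1 := by
      refine ⟨(n_layers - 1).toNat - 1, ?_⟩
      omega
    rw [hn, loopA]
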